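-- pv_equiv track=rewrite | github.com/SrAndres629/web-y-tracking-supabase-jorge | tests/test_architecture_audit.py | audit_placeholders
-- ===== SOURCE A (Python) =====
-- FORBIDDEN_TERMS = [
--     "REQUIRED_IN_VERCEL", "TODO", "FIXME", "REEMPLAZAR_AQUI",
--     "example.com", "placeholder", "YOUR_API_KEY", "sk_test",
--     "REPLACE_ME", "INSERT_KEY"
-- ]
--
-- def audit_placeholders(path, content):
--     """Fails if forbidden placeholders or TODOs are found"""
--     violations = []
--     for term in FORBIDDEN_TERMS:
--         if term in content:
--             # Simple line finding
--             for i, line in enumerate(content.splitlines()):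
--                 if term in line:
--                     violations.append(f"L{i+1}: Found prohibited term '{term}'")
--     return violations
-- ===== SOURCE B (Python) =====
-- FORBIDDEN_TERMS = [
--     "REQUIRED_IN_VERCEL", "TODO", "FIXME", "REEMPLAZAR_AQUI",
--     "example.com", "placeholder", "YOUR_API_KEY", "sk_test",
--     "REPLACE_ME", "INSERT_KEY"
-- ]
--
-- def audit_placeholders(path, content):
--     """Fails if forbidden placeholders or TODOs are found"""
--     hits = {t: [] for t in FORBIDDEN_TERMS}
--     for n, line in enumerate(content.splitlines(), 1):
--         for t in FORBIDDEN_TERMS: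
--             if t in line:
--                 hits[t].append(f"L{n}: Found prohibited term '{t}'")
--     out = []
--     for t in FORBIDDEN_TERMS:
--         out.extend(hits[t])
--     return out
-- ===== Notes on version B (the rewrite author's own statement) =====
-- stated objective: alternative
-- what changed: B scans the lines ONCE, grouping hits per term in a dict built during that single pass, then emits the groups in FORBIDDEN_TERMS order; it also drops A's redundant 'term in content' pre-check (a term never spans a line break, so it is redundant).
import Mathlib
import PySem

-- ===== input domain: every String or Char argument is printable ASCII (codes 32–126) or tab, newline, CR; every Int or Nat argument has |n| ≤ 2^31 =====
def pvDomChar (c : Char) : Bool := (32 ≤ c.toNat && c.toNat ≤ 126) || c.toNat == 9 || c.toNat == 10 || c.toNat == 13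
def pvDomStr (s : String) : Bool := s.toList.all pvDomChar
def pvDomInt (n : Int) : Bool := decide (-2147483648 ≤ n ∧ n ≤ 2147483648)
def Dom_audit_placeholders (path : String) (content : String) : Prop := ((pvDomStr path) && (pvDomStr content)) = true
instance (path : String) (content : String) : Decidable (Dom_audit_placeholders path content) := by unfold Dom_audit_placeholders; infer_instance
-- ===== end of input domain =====

-- B makes a single pass over the lines, grouping the messages per term in a dict and emitting
-- the groups in FORBIDDEN_TERMS order, instead of re-splitting and re-scanning all lines for
-- every matching term; same return value (proved below).

def FORBIDDEN_TERMS : List String :=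
  ["REQUIRED_IN_VERCEL", "TODO", "FIXME", "REEMPLAZAR_AQUI",
   "example.com", "placeholder", "YOUR_API_KEY", "sk_test",
   "REPLACE_ME", "INSERT_KEY"]

-- the f-string "L{n}: Found prohibited term '{term}'" (shared literal formatting helper)
def pvMsg (n : Int) (term : String) : String :=
  "L" ++ PySem.Int.toStr n ++ ": Found prohibited term '" ++ term ++ "'"

-- ===== PORT A =====
def audit_placeholders (path : String) (content : String) : List String :=
  FORBIDDEN_TERMS.foldl (fun violations term =>
    if PySem.Str.isIn term content then
      (PySem.List.enumerate (PySem.Str.splitlines content)).foldl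
        (fun vs p => if PySem.Str.isIn term p.2 then vs ++ [pvMsg (p.1 + 1) term] else vs)
        violations
    else violations) []

-- ===== PORT B =====
def audit_placeholders_alt (path : String) (content : String) : List String :=
  let hits0 : PySem.Dict String (List String) :=
    FORBIDDEN_TERMS.foldl (fun h t => h.insert t []) PySem.Dict.empty
  let hits :=
    (PySem.List.enumerate (PySem.Str.splitlines content) 1).foldl
      (fun h q =>
        FORBIDDEN_TERMS.foldl
          (fun h t => if PySem.Str.isIn t q.2 then h.modify t [] (· ++ [pvMsg q.1 t]) else h)
          h)
      hits0
  FORBIDDEN_TERMS.foldl (fun out t => out ++ hits.getD t []) []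

-- ===== PRECONDITION & SPEC =====
def Spec_audit_placeholders (path : String) (content : String) (out : List String) : Prop := out = audit_placeholders_alt path content
instance (path : String) (content : String) (out : List String) : Decidable (Spec_audit_placeholders path content out) := by unfold Spec_audit_placeholders; infer_instance

-- ===== CLAIM (what is proved, stated in full; the proofs are below) =====
def Claim_equal_audit_placeholders : Prop := ∀ (path : String) (content : String), Dom_audit_placeholders path content → Spec_audit_placeholders path content (audit_placeholders path content)

-- ===== LEMMAS AND PROOFS =====

-- per-term message list over the enumerated lines (proof-side abbreviation)
def pvLf (content term : String) : List String :=
  ((PySem.List.enumerate (PySem.Str.splitlines content)).filter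
      (fun p => PySem.Str.isIn term p.2)).map (fun p => pvMsg (p.1 + 1) term)

-- every line produced by splitlines.go is an infix of `full`, given the loop invariants
lemma go_infix (isB : Char → Bool) :
    ∀ n (s : List Char), s.length ≤ n → ∀ (cur : List Char) (acc : List (List Char)) (full : List Char),
      (∀ a ∈ acc, a <:+: full) → (cur.reverse ++ s) <:+: full →
      ∀ l ∈ PySem.Chars.splitlines.go isB s cur acc, l <:+: full := by
  intro n
  induction n with
  | zero =>
    intro s hs cur acc full hacc hcur l hl
    have : s = [] := List.eq_nil_of_length_eq_zero (Nat.le_zero.mp hs)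
    subst this
    rw [PySem.Chars.splitlines.go.eq_def] at hl
    simp only at hl
    split at hl
    · exact hacc _ (List.mem_reverse.mp hl)
    · rcases List.mem_cons.mp (List.mem_reverse.mp hl) with hh | hh
      · subst hh; simpa using hcur
      · exact hacc _ hh
  | succ m ih =>
    intro s hs cur acc full hacc hcur l hl
    rw [PySem.Chars.splitlines.go.eq_def] at hl
    split at hl
    · -- s = []
      split at hl
      · exact hacc _ (List.mem_reverse.mp hl)
      · rcases List.mem_cons.mp (List.mem_reverse.mp hl) with hh | hh
        · subst hh; simpa using hcur
        · exact hacc _ hh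
    · -- s = '\r' :: '\n' :: rest
      rename_i rest
      simp only [List.length_cons] at hs
      refine ih rest (by omega) [] (cur.reverse :: acc) full ?_ ?_ l hl
      · intro a ha
        rcases List.mem_cons.mp ha with hh | hh
        · subst hh
          exact ((List.prefix_append cur.reverse _).isInfix).trans hcur
        · exact hacc _ hh
      · simp only [List.reverse_nil, List.nil_append]
        exact (((List.suffix_cons _ _).trans (List.suffix_cons _ _)).trans
          (List.suffix_append cur.reverse _)).isInfix.trans hcur
    · -- s = c :: rest, not the '\r\n' pattern
      rename_i c rest hne
      simp only [List.length_cons] at hs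
      split at hl
      · refine ih rest (by omega) [] (cur.reverse :: acc) full ?_ ?_ l hl
        · intro a ha
          rcases List.mem_cons.mp ha with hh | hh
          · subst hh
            exact ((List.prefix_append cur.reverse _).isInfix).trans hcur
          · exact hacc _ hh
        · simp only [List.reverse_nil, List.nil_append]
          exact ((List.suffix_cons _ _).trans
            (List.suffix_append cur.reverse _)).isInfix.trans hcur
      · refine ih rest (by omega) (c :: cur) acc full hacc ?_ l hl
        simpa using hcur

lemma splitlines_infix (cs : List Char) : ∀ l ∈ PySem.Chars.splitlines cs, l <:+: cs := by
  intro l hl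
  unfold PySem.Chars.splitlines at hl
  exact go_infix _ cs.length cs le_rfl [] [] cs (by simp) (by simp) l hl

lemma line_isIn (content term line : String) (hline : line ∈ PySem.Str.splitlines content)
    (h : PySem.Str.isIn term line = true) : PySem.Str.isIn term content = true := by
  have h1 := (PySem.Str.isIn_iff_infix term line).mp h
  have h2 : line.toList ∈ PySem.Chars.splitlines content.toList := by
    rw [← PySem.Str.splitlines_map_toList]
    exact List.mem_map_of_mem hline
  exact (PySem.Str.isIn_iff_infix term content).mpr
    (h1.trans (splitlines_infix _ _ h2))

lemma snd_mem_enumerate {α : Type} (xs : List α) : ∀ (s : Int) (p : Int × α),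
    p ∈ PySem.List.enumerate xs s → p.2 ∈ xs := by
  induction xs with
  | nil => intro s p hp; simp [PySem.List.enumerate] at hp
  | cons x t ih =>
    intro s p hp
    rw [PySem.List.enumerate_cons] at hp
    rcases List.mem_cons.mp hp with hh | hh
    · subst hh; simp
    · exact List.mem_cons_of_mem _ (ih _ _ hh)

lemma Lf_nil (content term : String) (h : PySem.Str.isIn term content = false) :
    pvLf content term = [] := by
  unfold pvLf
  rw [List.filter_eq_nil_iff.mpr, List.map_nil]
  intro p hp
  simp only [Bool.not_eq_true]
  by_contra hc
  simp only [Bool.not_eq_false] at hc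
  have := line_isIn content term p.2 (snd_mem_enumerate _ _ _ hp) hc
  rw [h] at this; exact Bool.false_ne_true this

lemma A_eq (content : String) : ∀ (terms : List String) (acc : List String),
    terms.foldl (fun violations term =>
      if PySem.Str.isIn term content then
        (PySem.List.enumerate (PySem.Str.splitlines content)).foldl
          (fun vs p => if PySem.Str.isIn term p.2 then vs ++ [pvMsg (p.1 + 1) term] else vs)
          violations
      else violations) acc
    = acc ++ terms.flatMap (fun t => if PySem.Str.isIn t content then pvLf content t else []) := by
  intro terms
  induction terms with
  | nil => intro acc; simp
  | cons t ts ih =>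
    intro acc
    rw [List.foldl_cons, List.flatMap_cons, ih]
    by_cases h : PySem.Str.isIn t content = true
    · rw [if_pos h, if_pos h, PySem.List.foldl_append_if, List.append_assoc]
      rfl
    · simp only [Bool.not_eq_true] at h
      rw [if_neg (by intro hx; rw [h] at hx; exact Bool.false_ne_true hx),
        if_neg (by intro hx; rw [h] at hx; exact Bool.false_ne_true hx), List.nil_append]

lemma nodup_terms : FORBIDDEN_TERMS.Nodup := by decide

lemma enumerate_shift {α : Type} (xs : List α) : ∀ (s : Int),
    PySem.List.enumerate xs (s + 1)
      = (PySem.List.enumerate xs s).map (fun p => (p.1 + 1, p.2)) := by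
  induction xs with
  | nil => intro s; simp [PySem.List.enumerate]
  | cons x t ih =>
    intro s
    rw [PySem.List.enumerate_cons, PySem.List.enumerate_cons, List.map_cons, ih]

-- getD after the per-line inner fold over a nodup term list
lemma getD_termfold (p : Int × String) (k : String) :
    ∀ (ts : List String) (d : PySem.Dict String (List String)), ts.Nodup →
    (ts.foldl (fun d term =>
        if PySem.Str.isIn term p.2 then d.modify term [] (· ++ [pvMsg p.1 term]) else d) d).getD k []
    = if k ∈ ts ∧ PySem.Str.isIn k p.2 = true then d.getD k [] ++ [pvMsg p.1 k] else d.getD k [] := by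
  intro ts
  induction ts with
  | nil => intro d _; simp
  | cons t ts ih =>
    intro d hnd
    rw [List.foldl_cons, ih _ (List.nodup_cons.mp hnd).2]
    by_cases hk : k = t
    · subst hk
      have hkn : k ∉ ts := (List.nodup_cons.mp hnd).1
      by_cases hc : PySem.Str.isIn k p.2 = true
      · have hc' : PySem.Chars.isIn k.toList p.2.toList = true := by simpa using hc
        rw [if_pos hc]
        simp [hkn, hc']
      · simp only [Bool.not_eq_true] at hc
        have hc' : PySem.Chars.isIn k.toList p.2.toList = false := by simpa using hc
        simp [hkn, hc']
    · simp only [List.mem_cons, hk, false_or]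
      by_cases hc : PySem.Str.isIn t p.2 = true
      · rw [if_pos hc]
        simp only [PySem.Dict.getD_modify, if_neg hk]
      · simp only [Bool.not_eq_true] at hc
        have hc' : PySem.Chars.isIn t.toList p.2.toList = false := by simpa using hc
        simp [hc']

lemma getD_linefold (k : String) (hk : k ∈ FORBIDDEN_TERMS) :
    ∀ (ps : List (Int × String)) (d : PySem.Dict String (List String)),
    (ps.foldl (fun d p =>
        FORBIDDEN_TERMS.foldl
          (fun d term =>
            if PySem.Str.isIn term p.2 then d.modify term [] (· ++ [pvMsg p.1 term]) else d)
          d) d).getD k []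
    = d.getD k [] ++ (ps.filter (fun p => PySem.Str.isIn k p.2)).map (fun p => pvMsg p.1 k) := by
  intro ps
  induction ps with
  | nil => intro d; simp
  | cons p ps ih =>
    intro d
    rw [List.foldl_cons, ih, getD_termfold p k FORBIDDEN_TERMS d nodup_terms]
    by_cases hc : PySem.Str.isIn k p.2 = true
    · rw [if_pos ⟨hk, hc⟩, List.filter_cons_of_pos (by simpa using hc), List.map_cons,
        List.append_assoc, List.singleton_append]
    · simp only [Bool.not_eq_true] at hc
      rw [if_neg (by intro hx; rw [hc] at hx; exact Bool.false_ne_true hx.2),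
        List.filter_cons_of_neg (by simpa using hc)]

lemma getD_found0 (k : String) :
    (FORBIDDEN_TERMS.foldl (fun d term => d.insert term ([] : List String)) PySem.Dict.empty).getD k []
      = [] := by
  have : ∀ (ts : List String) (d : PySem.Dict String (List String)), d.getD k [] = [] →
      (ts.foldl (fun d term => d.insert term []) d).getD k [] = [] := by
    intro ts
    induction ts with
    | nil => intro d hd; simpa using hd
    | cons t ts ih =>
      intro d hd
      rw [List.foldl_cons]
      refine ih _ ?_
      rw [PySem.Dict.getD_insert]
      split <;> simp [hd]
  exact this _ _ (by simp)

lemma B_eq (path content : String) :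
    audit_placeholders_alt path content = FORBIDDEN_TERMS.flatMap (fun t => pvLf content t) := by
  unfold audit_placeholders_alt
  rw [PySem.List.foldl_append_eq_flatMap, List.nil_append]
  apply List.flatMap_congr
  intro t ht
  rw [getD_linefold t ht, getD_found0, List.nil_append]
  show _ = pvLf content t
  unfold pvLf
  have h01 : (0 : Int) + 1 = 1 := rfl
  rw [← h01, enumerate_shift, List.filter_map, List.map_map]
  rfl

-- ===== VERDICT (by name: the statement is the Claim_ definition above) =====
theorem audit_placeholders_spec : Claim_equal_audit_placeholders := by
  intro path content _hdom
  unfold Spec_audit_placeholders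
  rw [audit_placeholders, A_eq, B_eq, List.nil_append]
  apply List.flatMap_congr
  intro t _ht
  by_cases h : PySem.Str.isIn t content = true
  · rw [if_pos h]
  · simp only [Bool.not_eq_true] at h
    rw [if_neg (by intro hx; rw [h] at hx; exact Bool.false_ne_true hx), Lf_nil content t h]
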